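-- pv_equiv track=rewrite | github.com/yogi-budha/python | practice-poblem/function.py | countAlp
-- ===== SOURCE A (Python) =====
-- def countAlp(string_val):
--     capitalLetter = 'ABCDEFGHIJKLMNOPQRSTUVWXYZ'
--     smallLetter = 'abcdefghijklmnopqrstwxyz'
--     countUpperCaseLetter = 0;
--     countSmallCaseLetter = 0;
--     for i in string_val:
--         for j in capitalLetter:
--             if i == j:
--                 countUpperCaseLetter = countUpperCaseLetter + 1
--         for k in smallLetter:
--             if i == k:
--                 countSmallCaseLetter = countSmallCaseLetter+ 1
--
--     return (countUpperCaseLetter,countSmallCaseLetter)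
-- ===== SOURCE B (Python) =====
-- def countAlp(string_val):
--     capitalLetter = 'ABCDEFGHIJKLMNOPQRSTUVWXYZ'
--     smallLetter = 'abcdefghijklmnopqrstwxyz'
--     freq = {}
--     for ch in string_val:
--         freq[ch] = freq.get(ch, 0) + 1
--     countUpperCaseLetter = sum(freq.get(c, 0) for c in capitalLetter)
--     countSmallCaseLetter = sum(freq.get(c, 0) for c in smallLetter)
--     return (countUpperCaseLetter, countSmallCaseLetter)
-- ===== Notes on version B (the rewrite author's own statement) =====
-- stated objective: faster
-- what changed: B builds a character frequency table in one pass over the string and then sums the table entries over the two fixed alphabet strings (kept verbatim, including the original smallLetter missing 'u' and 'v'), instead of A's nested scan of both full alphabets for every input character.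
import Mathlib
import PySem

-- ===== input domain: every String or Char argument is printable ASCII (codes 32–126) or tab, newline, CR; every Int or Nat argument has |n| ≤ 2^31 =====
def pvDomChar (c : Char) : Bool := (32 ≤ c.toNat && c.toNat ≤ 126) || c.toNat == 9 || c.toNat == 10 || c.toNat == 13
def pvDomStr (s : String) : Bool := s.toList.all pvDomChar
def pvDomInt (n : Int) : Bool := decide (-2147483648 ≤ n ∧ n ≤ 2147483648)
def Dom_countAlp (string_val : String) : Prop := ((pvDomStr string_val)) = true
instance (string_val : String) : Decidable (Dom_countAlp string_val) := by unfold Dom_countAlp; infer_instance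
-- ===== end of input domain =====

-- B replaces A's per-character scans of both alphabets by a one-pass frequency dict
-- summed over the same alphabet strings (objective: faster, constant-factor).

-- ===== PORT A =====
-- A: nested loops; for each input character, scan both alphabet strings and bump the counters.
def countAlp (string_val : String) : Int × Int :=
  let capitalLetter := "ABCDEFGHIJKLMNOPQRSTUVWXYZ".toList
  let smallLetter := "abcdefghijklmnopqrstwxyz".toList
  string_val.toList.foldl (fun st i =>
    let u := capitalLetter.foldl (fun acc j => if j == i then acc + 1 else acc) st.1
    let l := smallLetter.foldl (fun acc k => if k == i then acc + 1 else acc) st.2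
    (u, l)) ((0 : Int), (0 : Int))

-- ===== PORT B =====
-- B: build freq = {ch: multiplicity} in one pass, then sum freq.get(c, 0) over each alphabet.
def countAlp_alt (string_val : String) : Int × Int :=
  let capitalLetter := "ABCDEFGHIJKLMNOPQRSTUVWXYZ".toList
  let smallLetter := "abcdefghijklmnopqrstwxyz".toList
  let freq : PySem.Dict Char Int :=
    string_val.toList.foldl (fun d ch => d.insert ch (d.getD ch 0 + 1)) PySem.Dict.empty
  (capitalLetter.foldl (fun acc c => acc + freq.getD c 0) 0,
   smallLetter.foldl (fun acc c => acc + freq.getD c 0) 0)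

-- ===== PRECONDITION & SPEC =====
def Spec_countAlp (string_val : String) (out : Int × Int) : Prop := out = countAlp_alt string_val
instance (string_val : String) (out : Int × Int) : Decidable (Spec_countAlp string_val out) := by unfold Spec_countAlp; infer_instance

-- ===== CLAIM (what is proved, stated in full; the proofs are below) =====
def Claim_equal_countAlp : Prop := ∀ (string_val : String), Dom_countAlp string_val → Spec_countAlp string_val (countAlp string_val)

-- ===== LEMMAS AND PROOFS =====

-- pointwise sum split over a list
theorem pv_sum_map_add (A : List Char) (f g : Char → Int) :
    (A.map (fun c => f c + g c)).sum = (A.map f).sum + (A.map g).sum := by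
  induction A with
  | nil => simp
  | cons a A ih => simp only [List.map_cons, List.sum_cons, ih]; ring

-- Σ_{c∈A} [i = c] = count i A
theorem pv_sum_indicator (A : List Char) (i : Char) :
    (A.map (fun c => if (i == c) = true then (1 : Int) else 0)).sum = (A.count i : Int) := by
  induction A with
  | nil => simp
  | cons a A ih =>
    simp only [List.map_cons, List.sum_cons, ih, List.count_cons]
    push_cast [Nat.cast_ite]
    have hab : (a == i) = (i == a) := by by_cases h : i = a <;> simp [h, eq_comm]
    rw [hab]
    ring

-- Σ_{c∈A} count c (i::s) = Σ_{c∈A} count c s + count i A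
theorem pv_sum_count_cons (A s : List Char) (i : Char) :
    (A.map (fun c => ((i :: s).count c : Int))).sum
      = (A.map (fun c => (s.count c : Int))).sum + (A.count i : Int) := by
  have : (A.map (fun c => ((i :: s).count c : Int)))
       = (A.map (fun c => (s.count c : Int) + if (i == c) = true then (1 : Int) else 0)) := by
    refine List.map_congr_left ?_
    intro c _
    simp only [List.count_cons]
    push_cast [Nat.cast_ite]
    ring
  rw [this, pv_sum_map_add, pv_sum_indicator]

-- double counting: Σ_{i∈s} count i A = Σ_{c∈A} count c s
theorem pv_double_count (s A : List Char) :
    (s.map (fun i => (A.count i : Int))).sum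
      = (A.map (fun c => (s.count c : Int))).sum := by
  induction s with
  | nil => simp
  | cons i s ih =>
    simp only [List.map_cons, List.sum_cons, ih, pv_sum_count_cons]
    ring

theorem countAlp_eq (s : String) :
    countAlp s = ((s.toList.map (fun i => (("ABCDEFGHIJKLMNOPQRSTUVWXYZ".toList).count i : Int))).sum,
                  (s.toList.map (fun i => (("abcdefghijklmnopqrstwxyz".toList).count i : Int))).sum) := by
  simp only [countAlp]
  have hcongr : ∀ (st : Int × Int) (i : Char), i ∈ s.toList →
      (List.foldl (fun acc j => if (j == i) = true then acc + 1 else acc) st.1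
          "ABCDEFGHIJKLMNOPQRSTUVWXYZ".toList,
       List.foldl (fun acc j => if (j == i) = true then acc + 1 else acc) st.2
          "abcdefghijklmnopqrstwxyz".toList)
    = (st.1 + (("ABCDEFGHIJKLMNOPQRSTUVWXYZ".toList).count i : Int),
       st.2 + (("abcdefghijklmnopqrstwxyz".toList).count i : Int)) := by
    intro st i _
    rw [PySem.List.foldl_beq_add_one, PySem.List.foldl_beq_add_one]
  rw [PySem.List.foldl_congr_mem s.toList _ _ (0, 0) hcongr]
  rw [PySem.List.foldl_prod_mk
        (f := fun a x => a + (List.count x "ABCDEFGHIJKLMNOPQRSTUVWXYZ".toList : Int))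
        (g := fun a x => a + (List.count x "abcdefghijklmnopqrstwxyz".toList : Int))]
  rw [PySem.List.foldl_add, PySem.List.foldl_add]
  simp

theorem countAlp_alt_eq (s : String) :
    countAlp_alt s = ((("ABCDEFGHIJKLMNOPQRSTUVWXYZ".toList).map (fun c => (s.toList.count c : Int))).sum,
                      (("abcdefghijklmnopqrstwxyz".toList).map (fun c => (s.toList.count c : Int))).sum) := by
  simp only [countAlp_alt, PySem.Dict.foldl_insert_getD_add_one_eq_counter]
  rw [PySem.List.foldl_add, PySem.List.foldl_add]
  simp [PySem.Dict.getD_counter]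

-- ===== VERDICT (by name: the statement is the Claim_ definition above) =====
theorem countAlp_spec : Claim_equal_countAlp := by
  intro s _
  unfold Spec_countAlp
  rw [countAlp_eq, countAlp_alt_eq,
      pv_double_count s.toList "ABCDEFGHIJKLMNOPQRSTUVWXYZ".toList,
      pv_double_count s.toList "abcdefghijklmnopqrstwxyz".toList]
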